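-- pv_equiv track=rewrite | github.com/sshevczo/eij | backend/eij/fixtures/open_ai_handler.py | limit_phrase
-- ===== SOURCE A (Python) =====
-- def limit_phrase(phrase, limit):
--     words = phrase.split()
--     result = []
--     current_length = 0
--     for word in words:
--         if current_length + len(word) + len(result) <= limit:
--             result.append(word)
--             current_length += len(word)
--         else:
--             break
--     return ' '.join(result)
-- ===== SOURCE B (Python) =====
-- def limit_phrase(phrase, limit):
--     words = phrase.split()
--     # joined[i] = length of ' '.join(words[:i+1])  (prefix-length table)
--     joined = []
--     total = 0
--     for i, w in enumerate(words):
--         total += len(w)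
--         joined.append(total + i)
--     # locate the cutoff: largest k with joined length of k words <= limit
--     k = 0
--     while k < len(joined) and joined[k] <= limit:
--         k += 1
--     return ' '.join(words[:k])
-- ===== Notes on version B (the rewrite author's own statement) =====
-- stated objective: alternative
-- what changed: B first builds a prefix-length table (joined length of each k-word prefix) in one pass and then locates the cutoff index in that table, instead of A's greedy loop that appends words to a result list while tracking a running length and breaking.
import Mathlib
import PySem

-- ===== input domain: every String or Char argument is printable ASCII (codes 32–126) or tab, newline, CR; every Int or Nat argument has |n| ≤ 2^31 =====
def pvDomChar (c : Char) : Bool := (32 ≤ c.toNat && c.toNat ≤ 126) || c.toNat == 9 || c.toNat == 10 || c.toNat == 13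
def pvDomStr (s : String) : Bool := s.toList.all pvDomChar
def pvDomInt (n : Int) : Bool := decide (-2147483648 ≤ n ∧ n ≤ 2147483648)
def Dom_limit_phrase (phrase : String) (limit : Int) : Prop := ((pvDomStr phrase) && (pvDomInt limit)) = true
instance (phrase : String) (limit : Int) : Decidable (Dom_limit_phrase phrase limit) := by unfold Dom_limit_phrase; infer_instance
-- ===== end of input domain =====

-- B builds a prefix-length table and locates the cutoff index in it, instead of A's greedy append-and-break loop; alternative decomposition, same cost.


-- ===== PORT A =====
-- A's loop: append words to `res` while `current_length + len(word) + len(result) <= limit`, break otherwise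
def pvLoopA (limit : Int) : List String → List String → Int → List String
  | [], res, _ => res
  | w :: ws, res, cur =>
    if cur + PySem.Str.len w + (res.length : Int) ≤ limit then
      pvLoopA limit ws (res ++ [w]) (cur + PySem.Str.len w)
    else res

def limit_phrase (phrase : String) (limit : Int) : String :=
  PySem.Str.join " " (pvLoopA limit (PySem.Str.split₀ phrase) [] 0)

-- ===== PORT B =====
-- B's first pass: joined[i] = total length of first i+1 words plus i separators
def pvJoinedLens : List Int → Int → Int → List Int
  | [], _, _ => []
  | l :: ls, total, i => (total + l + i) :: pvJoinedLens ls (total + l) (i + 1)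

-- B's second pass: the while loop locating the cutoff k
def pvCut (limit : Int) : List Int → Nat
  | [] => 0
  | j :: js => if j ≤ limit then pvCut limit js + 1 else 0

def limit_phrase_alt (phrase : String) (limit : Int) : String :=
  let words := PySem.Str.split₀ phrase
  let joined := pvJoinedLens (words.map PySem.Str.len) 0 0
  PySem.Str.join " " (words.take (pvCut limit joined))

-- ===== PRECONDITION & SPEC =====
def Spec_limit_phrase (phrase : String) (limit : Int) (out : String) : Prop := out = limit_phrase_alt phrase limit
instance (phrase : String) (limit : Int) (out : String) : Decidable (Spec_limit_phrase phrase limit out) := by unfold Spec_limit_phrase; infer_instance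

-- ===== CLAIM (what is proved, stated in full; the proofs are below) =====
def Claim_equal_limit_phrase : Prop := ∀ (phrase : String) (limit : Int), Dom_limit_phrase phrase limit → Spec_limit_phrase phrase limit (limit_phrase phrase limit)

-- ===== LEMMAS AND PROOFS =====
-- invariant: A's loop returns `res` followed by the prefix cut from the table built at offset (cur, res.length)
theorem pvLoopA_eq (limit : Int) (ws : List String) : ∀ (res : List String) (cur : Int),
    pvLoopA limit ws res cur =
      res ++ ws.take (pvCut limit (pvJoinedLens (ws.map PySem.Str.len) cur (res.length : Int))) := by
  induction ws with
  | nil => intro res cur; simp [pvLoopA, pvJoinedLens, pvCut]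
  | cons w ws ih =>
    intro res cur
    simp only [pvLoopA, List.map, pvJoinedLens, pvCut]
    by_cases h : cur + PySem.Str.len w + (res.length : Int) ≤ limit
    · rw [if_pos h, if_pos h, ih (res ++ [w]) (cur + PySem.Str.len w)]
      simp [List.take_succ_cons]
    · rw [if_neg h, if_neg h]
      simp

-- ===== VERDICT (by name: the statement is the Claim_ definition above) =====
theorem limit_phrase_spec : Claim_equal_limit_phrase := by
  intro phrase limit _
  unfold Spec_limit_phrase limit_phrase limit_phrase_alt
  rw [pvLoopA_eq]
  simp
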